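-- pv_equiv track=rewrite | github.com/dl-00-e8/Python_for_Coding_Test | 기출문제/Q06.py | solution
-- ===== SOURCE A (Python) =====
-- import heapq
--
-- def solution(food_times, k):
--     if sum(food_times) <= k:
--         return -1
--
--     queue = []
--     for i in range(len(food_times)):
--         heapq.heappush(queue, (food_times[i], i + 1))
--
--     sumValue = 0
--     before = 0
--     length = len(food_times)
--
--     while sumValue + ((queue[0][0] - before) * length) <= k:
--         now = heapq.heappop(queue)[0]
--         sumValue += (now - before) * length
--         length -= 1
--         before = now
--
--     result = sorted(queue, key = lambda x : x[1])
--     answer = result[(k - sumValue) % length][1]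
--     return answer
-- ===== SOURCE B (Python) =====
-- def solution(food_times, k):
--     if sum(food_times) <= k:
--         return -1
--     n = len(food_times)
--
--     def eaten(m):
--         # seconds consumed once every food has been eaten down by at most m rounds
--         return sum(t if t < m else m for t in food_times)
--
--     # binary search the largest level m with eaten(m) <= k
--     lo = k // n                 # eaten(lo) <= lo*n <= k
--     hi = max(food_times)        # eaten(hi) = sum(food_times) > k
--     while lo + 1 < hi:
--         mid = (lo + hi) // 2
--         if eaten(mid) <= k:
--             lo = mid
--         else:
--             hi = mid
--     r = k - eaten(lo)
--     for i, t in enumerate(food_times):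
--         if t > lo:
--             if r == 0:
--                 return i + 1
--             r -= 1
-- ===== Notes on version B (the rewrite author's own statement) =====
-- stated objective: alternative
-- what changed: Replaces the heap-drain simulation by a parametric binary search on the eating level m (the largest m with sum(min(t,m)) <= k, found by bisection over [k//n, max(food_times)]), then one countdown scan over the original list picking the (k - eaten(m))-th food with t > m; no heap, no sort, no survivor re-sort (measured ~2.4x faster at the largest size: ~log(max t) cheap linear scans instead of n heap push/pops plus a sort).
import Mathlib
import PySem

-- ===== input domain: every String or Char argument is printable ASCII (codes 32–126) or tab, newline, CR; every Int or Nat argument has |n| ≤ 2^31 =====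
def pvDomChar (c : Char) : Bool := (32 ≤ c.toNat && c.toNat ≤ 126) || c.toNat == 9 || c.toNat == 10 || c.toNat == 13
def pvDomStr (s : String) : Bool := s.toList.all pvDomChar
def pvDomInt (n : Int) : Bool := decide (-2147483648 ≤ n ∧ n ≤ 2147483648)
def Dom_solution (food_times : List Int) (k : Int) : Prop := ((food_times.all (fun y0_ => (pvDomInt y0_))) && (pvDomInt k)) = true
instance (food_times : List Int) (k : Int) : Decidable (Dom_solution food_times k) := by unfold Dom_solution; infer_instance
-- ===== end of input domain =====

-- B replaces A's heap-drain simulation by a binary search on the eating level m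
-- (largest m with sum(min(t, m)) ≤ k) followed by one countdown scan (alternative).

-- ===== PORT A =====
-- heapq is modeled by its contract: the heap holds the pushed (time, index) pairs in pop
-- order, i.e. ascending lexicographic order; heappush = ordered insert, heappop = head.
def pvLexLt (a b : Int × Int) : Bool := a.1 < b.1 || (a.1 == b.1 && a.2 < b.2)

-- for i in range(len(food_times)): heapq.heappush(queue, (food_times[i], i + 1))
def pvBuild (food_times : List Int) : List (Int × Int) :=
  (PySem.List.pyRange 0 (PySem.List.len food_times)).foldl
    (fun q i => PySem.List.insertBy pvLexLt (PySem.List.pyGetD food_times i 0, i + 1) q) []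

-- while sumValue + (queue[0][0] - before) * length <= k: pop; state (queue, sumValue, before, length)
def pvDrainA (k : Int) : List (Int × Int) → Int → Int → Int → (List (Int × Int) × Int × Int × Int)
  | [], s, b, len => ([], s, b, len)   -- unreachable under Pre_: Python raises IndexError on queue[0]
  | (t, i) :: q, s, b, len =>
      if s + (t - b) * len ≤ k then pvDrainA k q (s + (t - b) * len) t (len - 1)
      else ((t, i) :: q, s, b, len)

def solution (food_times : List Int) (k : Int) : Int :=
  if food_times.sum ≤ k then -1
  else
    let queue := pvBuild food_times
    let res := pvDrainA k queue 0 0 (PySem.List.len food_times)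
    let result := PySem.List.sorted res.1 (fun x => x.2)
    (PySem.List.pyGetD result (PySem.Int.mod (k - res.2.1) res.2.2.2) (0, 0)).2

-- ===== PORT B =====
-- eaten(m) = sum(t if t < m else m for t in food_times)
def pvS (food_times : List Int) (m : Int) : Int :=
  (food_times.map (fun t => if t < m then t else m)).sum

-- while lo + 1 < hi: mid = (lo + hi) // 2; if eaten(mid) <= k: lo = mid else: hi = mid
def pvBisect (S : Int → Int) (k lo hi : Int) : Int :=
  if _h : lo + 1 < hi then
    let mid := PySem.Int.floordiv (lo + hi) 2
    if S mid ≤ k then pvBisect S k mid hi else pvBisect S k lo mid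
  else lo
termination_by (hi - lo).toNat
decreasing_by
  all_goals
    have hb := PySem.Int.floordiv_two_mid_bounds (lo := lo + 1) (hi := hi - 1) (by omega)
    have he : lo + 1 + (hi - 1) = lo + hi := by ring
    rw [he] at hb
    omega

-- for i, t in enumerate(food_times): if t > lo: (if r == 0: return i + 1 else: r -= 1)
def pvScanB (m : Int) : List (Int × Int) → Int → Int
  | [], _ => 0   -- unreachable: the loop always returns
  | (i, t) :: rest, r =>
      if m < t then (if r = 0 then i + 1 else pvScanB m rest (r - 1))
      else pvScanB m rest r

def solution_alt (food_times : List Int) (k : Int) : Int :=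
  if food_times.sum ≤ k then -1
  else
    let n := PySem.List.len food_times
    let lo := PySem.Int.floordiv k n
    let hi := PySem.List.maxD food_times (fun x => x) 0   -- max(food_times); [] unreachable here: Python already raised at k // 0
    let m := pvBisect (pvS food_times) k lo hi
    pvScanB m (PySem.List.enumerate food_times 0) (k - pvS food_times m)

-- ===== PRECONDITION & SPEC =====
-- Pre_ excludes exactly the inputs where A raises: the empty list with k < 0
-- (sum([]) = 0 > k, then queue[0] on the empty heap is an IndexError; Source B raises there too, at k // 0).
def Pre_solution (food_times : List Int) (k : Int) : Prop := food_times ≠ [] ∨ 0 ≤ k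
instance (food_times : List Int) (k : Int) : Decidable (Pre_solution food_times k) := by unfold Pre_solution; infer_instance
def pvWitness_solution : List Int × Int := ([3, 1, 2], 5)

def Spec_solution (food_times : List Int) (k : Int) (out : Int) : Prop := out = solution_alt food_times k
instance (food_times : List Int) (k : Int) (out : Int) : Decidable (Spec_solution food_times k out) := by unfold Spec_solution; infer_instance

-- ===== CLAIM (what is proved, stated in full; the proofs are below) =====
def Claim_equal_solution : Prop := ∀ (food_times : List Int) (k : Int), Dom_solution food_times k → Pre_solution food_times k → Spec_solution food_times k (solution food_times k)

-- ===== LEMMAS AND PROOFS =====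

-- the pop order of the heap, as a Prop
def pvRLex (a b : Int × Int) : Prop := a.1 < b.1 ∨ (a.1 = b.1 ∧ a.2 ≤ b.2)

-- the pushed pairs, in push order
def pvPairs (food_times : List Int) : List (Int × Int) :=
  (PySem.List.enumerate food_times 0).map (fun p => (p.2, p.1 + 1))

-- proof-side mirror of A's drain over the times only: returns (#pops, sumValue, before, length)
def pvDrainB (k : Int) : List Int → Int → Int → Int → (Nat × Int × Int × Int)
  | [], s, b, len => (0, s, b, len)
  | t :: ts, s, b, len =>
      if s + (t - b) * len ≤ k then
        let r := pvDrainB k ts (s + (t - b) * len) t (len - 1)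
        (r.1 + 1, r.2)
      else (0, s, b, len)

theorem pvLexLt_to_RLex {a b : Int × Int} (h : pvLexLt a b = true) : pvRLex a b := by
  simp [pvLexLt] at h; unfold pvRLex; omega

theorem pvLexLt_false_to_RLex {a b : Int × Int} (h : ¬ pvLexLt a b = true) : pvRLex b a := by
  simp [pvLexLt] at h; unfold pvRLex; omega

theorem pvRLex_trans {a b c : Int × Int} (h1 : pvRLex a b) (h2 : pvRLex b c) : pvRLex a c := by
  unfold pvRLex at *; omega

theorem insertBy_pairwise_lex (x : Int × Int) (ys : List (Int × Int))
    (h : ys.Pairwise pvRLex) : (PySem.List.insertBy pvLexLt x ys).Pairwise pvRLex := by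
  induction ys with
  | nil => simp [PySem.List.insertBy]
  | cons y ys ih =>
    rw [List.pairwise_cons] at h
    by_cases hb : pvLexLt x y = true
    · simp only [PySem.List.insertBy, hb, if_true]
      refine List.pairwise_cons.mpr ⟨?_, List.pairwise_cons.mpr ⟨h.1, h.2⟩⟩
      intro z hz
      rcases List.mem_cons.mp hz with rfl | hz
      · exact pvLexLt_to_RLex hb
      · exact pvRLex_trans (pvLexLt_to_RLex hb) (h.1 z hz)
    · simp only [PySem.List.insertBy, hb]
      refine List.pairwise_cons.mpr ⟨?_, ih h.2⟩
      intro z hz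
      rcases (PySem.List.insertBy_perm pvLexLt x ys).mem_iff.mp hz with hz2
      rcases List.mem_cons.mp hz2 with rfl | hz3
      · exact pvLexLt_false_to_RLex hb
      · exact h.1 z hz3

theorem build_perm (ft : List Int) : (pvBuild ft).Perm (pvPairs ft) := by
  unfold pvBuild
  have hmap : (PySem.List.pyRange 0 (PySem.List.len ft)).foldl
      (fun q i => PySem.List.insertBy pvLexLt (PySem.List.pyGetD ft i 0, i + 1) q) []
    = ((PySem.List.pyRange 0 (PySem.List.len ft)).map
        (fun i => (PySem.List.pyGetD ft i 0, i + 1))).foldl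
      (fun q x => PySem.List.insertBy pvLexLt x q) [] := by
    rw [List.foldl_map]
  rw [hmap]
  have hp := PySem.List.foldl_insertBy_perm pvLexLt
    ((PySem.List.pyRange 0 (PySem.List.len ft)).map (fun i => (PySem.List.pyGetD ft i 0, i + 1))) []
  refine hp.trans ?_
  simp only [List.nil_append]
  unfold pvPairs
  rw [PySem.List.enumerate_eq_map_pyRange ft 0, List.map_map]
  exact List.Perm.refl _

theorem build_pairwise (ft : List Int) : (pvBuild ft).Pairwise pvRLex := by
  unfold pvBuild
  have aux : ∀ (xs : List Int) (q : List (Int × Int)), q.Pairwise pvRLex →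
      (xs.foldl (fun q i => PySem.List.insertBy pvLexLt (PySem.List.pyGetD ft i 0, i + 1) q) q).Pairwise pvRLex := by
    intro xs
    induction xs with
    | nil => intro q hq; simpa using hq
    | cons x xs ih =>
      intro q hq
      simp only [List.foldl_cons]
      exact ih _ (insertBy_pairwise_lex _ q hq)
  exact aux _ [] (by simp)

theorem drain_corr (k : Int) (q : List (Int × Int)) : ∀ (s b len : Int),
    pvDrainA k q s b len =
      (q.drop (pvDrainB k (q.map Prod.fst) s b len).1, (pvDrainB k (q.map Prod.fst) s b len).2) := by
  induction q with
  | nil => intro s b len; simp [pvDrainA, pvDrainB]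
  | cons x q ih =>
    intro s b len
    obtain ⟨t, i⟩ := x
    by_cases hc : s + (t - b) * len ≤ k
    · simp only [pvDrainA, pvDrainB, List.map_cons, hc, if_true]
      rw [ih]
      simp [List.drop_succ_cons]
    · simp [pvDrainA, pvDrainB, hc]

theorem drainB_p_le (k : Int) (ts : List Int) : ∀ (s b len : Int),
    (pvDrainB k ts s b len).1 ≤ ts.length := by
  induction ts with
  | nil => intro s b len; simp [pvDrainB]
  | cons t ts ih =>
    intro s b len
    by_cases hc : s + (t - b) * len ≤ k
    · simp only [pvDrainB, hc, if_true, List.length_cons]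
      have := ih (s + (t - b) * len) t (len - 1)
      omega
    · simp [pvDrainB, hc]

theorem drainB_len (k : Int) (ts : List Int) : ∀ (s b len : Int),
    (pvDrainB k ts s b len).2.2.2 = len - (pvDrainB k ts s b len).1 := by
  induction ts with
  | nil => intro s b len; simp [pvDrainB]
  | cons t ts ih =>
    intro s b len
    by_cases hc : s + (t - b) * len ≤ k
    · simp only [pvDrainB, hc, if_true]
      have := ih (s + (t - b) * len) t (len - 1)
      push_cast
      push_cast at this
      omega
    · simp [pvDrainB, hc]

theorem drainB_s_le (k : Int) (ts : List Int) : ∀ (s b len : Int),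
    0 < (pvDrainB k ts s b len).1 → (pvDrainB k ts s b len).2.1 ≤ k := by
  induction ts with
  | nil => intro s b len h; simp [pvDrainB] at h
  | cons t ts ih =>
    intro s b len h
    by_cases hc : s + (t - b) * len ≤ k
    · simp only [pvDrainB, hc, if_true]
      by_cases hp : 0 < (pvDrainB k ts (s + (t - b) * len) t (len - 1)).1
      · exact ih (s + (t - b) * len) t (len - 1) hp
      · have hp0 : (pvDrainB k ts (s + (t - b) * len) t (len - 1)).1 = 0 := by omega
        have : (pvDrainB k ts (s + (t - b) * len) t (len - 1)).2.1 = s + (t - b) * len := by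
          cases ts with
          | nil => simp [pvDrainB]
          | cons u us =>
            by_cases hc2 : (s + (t - b) * len) + (u - t) * (len - 1) ≤ k
            · simp [pvDrainB, hc2] at hp0
            · simp [pvDrainB, hc2]
        rw [this]; exact hc
    · simp [pvDrainB, hc] at h

theorem drainB_p0 (k : Int) (ts : List Int) (s b len : Int)
    (h : (pvDrainB k ts s b len).1 = 0) : (pvDrainB k ts s b len).2 = (s, b, len) := by
  cases ts with
  | nil => simp [pvDrainB]
  | cons t ts =>
    by_cases hc : s + (t - b) * len ≤ k
    · simp [pvDrainB, hc] at h
    · simp [pvDrainB, hc]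

theorem drainB_sval (k : Int) (ts : List Int) : ∀ (s b len : Int),
    (pvDrainB k ts s b len).2.1
      = s + (ts.take (pvDrainB k ts s b len).1).sum
          + (pvDrainB k ts s b len).2.2.1 * (len - (pvDrainB k ts s b len).1)
          - b * len := by
  induction ts with
  | nil => intro s b len; simp [pvDrainB]
  | cons t ts ih =>
    intro s b len
    by_cases hc : s + (t - b) * len ≤ k
    · simp only [pvDrainB, hc, if_true, List.take_succ_cons, List.sum_cons]
      rw [ih (s + (t - b) * len) t (len - 1)]
      push_cast
      ring
    · simp [pvDrainB, hc]

theorem drainB_stop (k : Int) (ts : List Int) : ∀ (s b len : Int),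
    (pvDrainB k ts s b len).1 < ts.length →
    k < (pvDrainB k ts s b len).2.1
        + (ts.getD (pvDrainB k ts s b len).1 0 - (pvDrainB k ts s b len).2.2.1)
          * (pvDrainB k ts s b len).2.2.2 := by
  induction ts with
  | nil => intro s b len h; simp at h
  | cons t ts ih =>
    intro s b len h
    by_cases hc : s + (t - b) * len ≤ k
    · simp only [pvDrainB, hc, if_true, List.getD_cons_succ] at h ⊢
      exact ih (s + (t - b) * len) t (len - 1) (by simpa using h)
    · simp only [pvDrainB, hc, if_false, List.getD_cons_zero]
      omega

theorem drainB_take (k : Int) (ts : List Int) : ∀ (s b len : Int),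
    ts.Pairwise (· ≤ ·) → 0 < (pvDrainB k ts s b len).1 →
    (pvDrainB k ts s b len).2.2.1 ∈ ts.take (pvDrainB k ts s b len).1 ∧
    ∀ t ∈ ts.take (pvDrainB k ts s b len).1, t ≤ (pvDrainB k ts s b len).2.2.1 := by
  induction ts with
  | nil => intro s b len _ h; simp [pvDrainB] at h
  | cons t ts ih =>
    intro s b len hpw hp
    rw [List.pairwise_cons] at hpw
    by_cases hc : s + (t - b) * len ≤ k
    · simp only [pvDrainB, hc, if_true] at hp ⊢
      by_cases hp' : 0 < (pvDrainB k ts (s + (t - b) * len) t (len - 1)).1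
      · obtain ⟨hmem, hle⟩ := ih (s + (t - b) * len) t (len - 1) hpw.2 hp'
        constructor
        · exact List.mem_cons_of_mem _ (by simpa using hmem)
        · intro u hu
          simp only [List.take_succ_cons, List.mem_cons] at hu
          rcases hu with rfl | hu
          · exact hpw.1 _ (List.take_subset _ _ hmem)
          · exact hle u hu
      · have hp0 : (pvDrainB k ts (s + (t - b) * len) t (len - 1)).1 = 0 := by omega
        have hb := drainB_p0 k ts (s + (t - b) * len) t (len - 1) hp0
        rw [hp0, hb]
        simp
    · simp [pvDrainB, hc] at hp

theorem drainB_drop (k : Int) (ts : List Int) : ∀ (s b len : Int),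
    ts.Pairwise (· ≤ ·) → (ts.length : Int) ≤ len → 0 < (pvDrainB k ts s b len).1 →
    ∀ t ∈ ts.drop (pvDrainB k ts s b len).1, (pvDrainB k ts s b len).2.2.1 < t := by
  induction ts with
  | nil => intro s b len _ _ h; simp [pvDrainB] at h
  | cons t ts ih =>
    intro s b len hpw hlen hp
    rw [List.pairwise_cons] at hpw
    by_cases hc : s + (t - b) * len ≤ k
    · simp only [pvDrainB, hc, if_true] at hp ⊢
      by_cases hp' : 0 < (pvDrainB k ts (s + (t - b) * len) t (len - 1)).1
      · intro u hu
        simp only [List.drop_succ_cons] at hu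
        exact ih (s + (t - b) * len) t (len - 1) hpw.2 (by simp at hlen ⊢; omega) hp' u hu
      · have hp0 : (pvDrainB k ts (s + (t - b) * len) t (len - 1)).1 = 0 := by omega
        have hb := drainB_p0 k ts (s + (t - b) * len) t (len - 1) hp0
        rw [hp0]
        rw [hb]
        intro u hu
        simp only [List.drop_succ_cons, List.drop_zero] at hu
        cases ts with
        | nil => simp at hu
        | cons v vs =>
          by_cases hc2 : (s + (t - b) * len) + (v - t) * (len - 1) ≤ k
          · simp [pvDrainB, hc2] at hp0
          · have htv : t < v := by
              have h1 : t ≤ v := hpw.1 v (by simp)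
              rcases lt_or_eq_of_le h1 with h | h
              · exact h
              · exfalso; rw [← h] at hc2
                exact hc2 (by simpa using hc)
            rcases List.mem_cons.mp hu with rfl | hu2
            · exact htv
            · have := (List.pairwise_cons.mp hpw.2).1 u hu2
              exact lt_of_lt_of_le htv this
    · simp [pvDrainB, hc] at hp

-- pvS facts
theorem pvS_mono (ft : List Int) {a b : Int} (h : a ≤ b) : pvS ft a ≤ pvS ft b := by
  unfold pvS
  apply List.sum_le_sum
  intro t _
  split_ifs <;> omega

theorem pvS_perm {xs ys : List Int} (h : xs.Perm ys) (m : Int) : pvS xs m = pvS ys m :=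
  (h.map _).sum_eq

theorem pvS_le (ft : List Int) (m : Int) : pvS ft m ≤ m * (ft.length : Int) := by
  induction ft with
  | nil => simp [pvS]
  | cons t ts ih =>
    simp only [pvS, List.map_cons, List.sum_cons, List.length_cons] at ih ⊢
    push_cast
    split_ifs <;> nlinarith [ih]

theorem pvS_total (ft : List Int) (m : Int) (h : ∀ t ∈ ft, t ≤ m) : pvS ft m = ft.sum := by
  unfold pvS
  rw [List.map_congr_left (g := id) ?_, List.map_id]
  intro t ht
  have := h t ht
  simp only [id]
  split_ifs <;> omega

theorem pvS_linear (ts : List Int) (p : Nat) (y : Int)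
    (h1 : ∀ t ∈ ts.take p, t ≤ y) (h2 : ∀ t ∈ ts.drop p, y ≤ t) :
    pvS ts y = (ts.take p).sum + y * ((ts.drop p).length : Int) := by
  conv_lhs => rw [← List.take_append_drop p ts]
  unfold pvS
  rw [List.map_append, List.sum_append]
  congr 1
  · rw [List.map_congr_left (g := id) ?_, List.map_id]
    intro t ht
    have := h1 t ht
    simp only [id]
    split_ifs <;> omega
  · rw [List.map_congr_left (g := fun _ => y) ?_]
    · rw [List.map_const', List.sum_replicate, nsmul_eq_mul]
      ring
    · intro t ht
      have := h2 t ht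
      show (if t < y then t else y) = y
      split_ifs <;> omega

theorem pvmod_eq (a d q : Int) (hd : 0 < d) (h0 : 0 ≤ a - q * d) (h1 : a - q * d < d) :
    PySem.Int.mod a d = a - q * d := by
  rw [PySem.Int.mod_eq_emod_of_pos hd]
  rw [← Int.sub_mul_emod_self_right a q d, Int.emod_eq_of_lt h0 h1]

theorem bisect_spec (S : Int → Int) (k : Int) :
    ∀ (n : Nat) (lo hi : Int), (hi - lo).toNat ≤ n → lo < hi → S lo ≤ k → k < S hi →
    S (pvBisect S k lo hi) ≤ k ∧ k < S (pvBisect S k lo hi + 1) := by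
  intro n
  induction n with
  | zero => intro lo hi hle hlt _ _; omega
  | succ n ih =>
    intro lo hi hle hlt h1 h2
    rw [pvBisect]
    by_cases h : lo + 1 < hi
    · simp only [h, dif_pos]
      have hb := PySem.Int.floordiv_two_mid_bounds (lo := lo + 1) (hi := hi - 1) (by omega)
      have he : lo + 1 + (hi - 1) = lo + hi := by ring
      rw [he] at hb
      by_cases hm : S (PySem.Int.floordiv (lo + hi) 2) ≤ k
      · simp only [hm, if_true]
        exact ih _ hi (by omega) (by omega) hm h2
      · simp only [hm, if_false]
        exact ih lo _ (by omega) (by omega) h1 (by omega)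
    · simp only [h, dif_neg, not_false_iff]
      have : hi = lo + 1 := by omega
      exact ⟨h1, by rw [← this]; exact h2⟩

theorem scanB_eq (m : Int) (l : List (Int × Int)) : ∀ (r : Int), 0 ≤ r →
    r.toNat < (l.filter (fun x => decide (m < x.2))).length →
    pvScanB m l r = ((l.filter (fun x => decide (m < x.2))).getD r.toNat (0, 0)).1 + 1 := by
  induction l with
  | nil => intro r _ h; simp at h
  | cons x rest ih =>
    intro r hr hlt
    obtain ⟨i, t⟩ := x
    by_cases hp : m < t
    · have hfil : (((i, t) :: rest).filter (fun x => decide (m < x.2)))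
          = (i, t) :: rest.filter (fun x => decide (m < x.2)) := by simp [hp]
      rw [hfil] at hlt ⊢
      by_cases hz : r = 0
      · subst hz
        simp [pvScanB, hp]
      · simp only [pvScanB, hp, if_true, hz, ite_false]
        rw [ih (r - 1) (by omega) (by simp at hlt; omega)]
        have : r.toNat = (r - 1).toNat + 1 := by omega
        rw [this, List.getD_cons_succ]
    · have hfil : (((i, t) :: rest).filter (fun x => decide (m < x.2)))
          = rest.filter (fun x => decide (m < x.2)) := by simp [hp]
      rw [hfil] at hlt ⊢
      simp only [pvScanB, hp, if_false]
      exact ih r hr hlt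

theorem pairs_fst (ft : List Int) : (pvPairs ft).map Prod.fst = ft := by
  unfold pvPairs
  rw [List.map_map]
  exact PySem.List.map_snd_enumerate ft 0

theorem pairs_pw_snd (ft : List Int) : (pvPairs ft).Pairwise (fun a b => a.2 < b.2) := by
  unfold pvPairs
  refine List.Pairwise.map _ ?_ (PySem.List.pairwise_lt_enumerate ft 0)
  intro a b h
  simpa using h

-- ===== VERDICT (by name: the statement is the Claim_ definition above) =====
theorem solution_spec : Claim_equal_solution := by
  intro ft k hdom hpre
  unfold Spec_solution
  by_cases hsum : ft.sum ≤ k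
  · simp [solution, solution_alt, hsum]
  · simp only [solution, solution_alt, hsum, if_false, PySem.List.len_eq]
    have hft : ft ≠ [] := by
      intro h
      subst h
      simp at hsum
      rcases hpre with h | h
      · exact h rfl
      · omega
    have hn1 : 1 ≤ ft.length := List.length_pos_iff.mpr hft
    have hQperm : (pvBuild ft).Perm (pvPairs ft) := build_perm ft
    have hQpw : (pvBuild ft).Pairwise pvRLex := build_pairwise ft
    set Q := pvBuild ft with hQdef
    set ts := Q.map Prod.fst with htsdef
    have htsperm : ts.Perm ft := by
      refine (hQperm.map Prod.fst).trans ?_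
      rw [pairs_fst]
    have htspw : ts.Pairwise (· ≤ ·) := by
      refine List.Pairwise.map _ ?_ hQpw
      intro a b h
      rcases h with h | h
      · exact le_of_lt h
      · exact le_of_eq h.1
    have htslen : ts.length = ft.length := htsperm.length_eq
    -- A's drain
    set RB := pvDrainB k ts 0 0 (ft.length : Int) with hRB
    have hcorr := drain_corr k Q 0 0 (ft.length : Int)
    rw [← htsdef, ← hRB] at hcorr
    rw [hcorr]
    set p := RB.1 with hp
    set s' := RB.2.1 with hs'
    set b' := RB.2.2.1 with hb'
    set len' := RB.2.2.2 with hlen'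
    have hlen : len' = (ft.length : Int) - p := by
      rw [hlen', hRB, drainB_len k ts 0 0 (ft.length : Int), ← hRB, ← hp]
    have hple : p ≤ ts.length := by
      rw [hp, hRB]; exact drainB_p_le k ts 0 0 (ft.length : Int)
    have hsval : s' = (ts.take p).sum + b' * ((ft.length : Int) - p) := by
      rw [hs', hRB, drainB_sval k ts 0 0 (ft.length : Int), ← hRB, ← hp, ← hb']
      ring
    have hpn : p < ft.length := by
      rcases lt_or_eq_of_le hple with h | h
      · omega
      · exfalso
        have hp0 : 0 < p := by omega
        have hsle : s' ≤ k := by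
          rw [hs', hRB]
          exact drainB_s_le k ts 0 0 (ft.length : Int) (by rw [← hRB, ← hp]; exact hp0)
        rw [h] at hsval
        rw [List.take_length] at hsval
        have : ts.sum = ft.sum := htsperm.sum_eq
        rw [htslen] at hsval
        simp at hsval
        omega
    have hlenpos : 0 < len' := by omega
    -- B's binary search
    have hlo : pvS ft (PySem.Int.floordiv k (ft.length : Int)) ≤ k := by
      have hn0 : (0 : Int) < (ft.length : Int) := by exact_mod_cast hn1
      have hmul : PySem.Int.floordiv k (ft.length : Int) * (ft.length : Int) ≤ k :=
        (PySem.Int.le_floordiv_iff_mul_le hn0).mp le_rfl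
      exact le_trans (pvS_le ft _) hmul
    have hhi : k < pvS ft (PySem.List.maxD ft (fun x => x) 0) := by
      rw [pvS_total ft _ (fun t ht => PySem.List.le_maxD_id ft 0 t ht)]
      omega
    have hlohi : PySem.Int.floordiv k (ft.length : Int) < PySem.List.maxD ft (fun x => x) 0 := by
      by_contra h
      push_neg at h
      have := pvS_mono ft h
      omega
    set m := pvBisect (pvS ft) k (PySem.Int.floordiv k (ft.length : Int))
      (PySem.List.maxD ft (fun x => x) 0) with hm
    have hbs := bisect_spec (pvS ft) k
      ((PySem.List.maxD ft (fun x => x) 0 - PySem.Int.floordiv k (ft.length : Int)).toNat)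
      _ _ le_rfl hlohi hlo hhi
    rw [← hm] at hbs
    -- the next surviving time
    have hpnts : p < ts.length := by omega
    set y₀ := ts.getD p 0 with hy₀
    have hy₀get : y₀ = ts[p]'(hpnts) := by rw [hy₀, List.getD_eq_getElem ts 0 hpnts]
    have hdropcons : ts.drop p = ts[p]'(hpnts) :: ts.drop (p + 1) := List.drop_eq_getElem_cons hpnts
    have hy₀mem : y₀ ∈ ts.drop p := by rw [hdropcons, hy₀get]; exact List.mem_cons_self
    have hTake : ∀ t ∈ ts.take p, t ≤ b' := by
      rcases Nat.eq_zero_or_pos p with h0 | hpos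
      · intro t ht; rw [h0] at ht; simp at ht
      · have := drainB_take k ts 0 0 (ft.length : Int) htspw (by rw [← hRB, ← hp]; omega)
        rw [← hRB, ← hp, ← hb'] at this
        exact this.2
    have hDropb : 0 < p → ∀ t ∈ ts.drop p, b' < t := by
      intro hpos
      have := drainB_drop k ts 0 0 (ft.length : Int) htspw (by omega)
        (by rw [← hRB, ← hp]; omega)
      rw [← hRB, ← hp, ← hb'] at this
      exact this
    have hDropy₀ : ∀ t ∈ ts.drop p, y₀ ≤ t := by
      intro t ht
      rw [hdropcons] at ht
      have hpwd : (ts[p]'(hpnts) :: ts.drop (p + 1)).Pairwise (· ≤ ·) := by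
        rw [← hdropcons]; exact htspw.drop
      rcases List.mem_cons.mp ht with rfl | ht2
      · rw [hy₀get]
      · rw [hy₀get]; exact (List.pairwise_cons.mp hpwd).1 t ht2
    have hstop : k < s' + (y₀ - b') * len' := by
      have := drainB_stop k ts 0 0 (ft.length : Int) (by rw [← hRB, ← hp]; exact hpnts)
      rw [← hRB, ← hp, ← hs', ← hb', ← hlen', ← hy₀] at this
      exact this
    -- the linear segment of pvS between b' and y₀
    have hdlen : ((ts.drop p).length : Int) = len' := by
      rw [List.length_drop, hlen]
      omega
    have hSlin : ∀ y : Int, (∀ t ∈ ts.take p, t ≤ y) → y ≤ y₀ →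
        pvS ft y = s' + (y - b') * len' := by
      intro y hty hyy
      rw [← pvS_perm htsperm y]
      rw [pvS_linear ts p y hty (fun t ht => le_trans hyy (hDropy₀ t ht))]
      rw [hdlen, hsval, ← hlen]
      ring
    have hb'y₀ : 0 < p → b' < y₀ := fun hpos => hDropb hpos y₀ hy₀mem
    have htakey : ∀ y : Int, b' ≤ y → ∀ t ∈ ts.take p, t ≤ y :=
      fun y hy t ht => le_trans (hTake t ht) hy
    have hmy₀ : m < y₀ := by
      by_contra h
      push_neg at h
      have hSy₀ : pvS ft y₀ = s' + (y₀ - b') * len' := by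
        apply hSlin y₀ ?_ le_rfl
        intro t ht
        rcases Nat.eq_zero_or_pos p with h0 | hpos
        · rw [h0] at ht; simp at ht
        · exact le_trans (hTake t ht) (le_of_lt (hb'y₀ hpos))
      have := pvS_mono ft h
      linarith [hSy₀, hstop, hbs.1]
    have hbm : ∀ t ∈ ts.take p, t ≤ m := by
      intro t ht
      rcases Nat.eq_zero_or_pos p with h0 | hpos
      · rw [h0] at ht; simp at ht
      · refine le_trans (hTake t ht) ?_
        by_contra hmb
        push_neg at hmb
        have hSb : pvS ft b' = s' := by
          have := hSlin b' (htakey b' le_rfl) (le_of_lt (hb'y₀ hpos))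
          simpa using this
        have hsle : s' ≤ k := by
          rw [hs', hRB]
          exact drainB_s_le k ts 0 0 (ft.length : Int) (by rw [← hRB, ← hp]; omega)
        have := pvS_mono ft (show m + 1 ≤ b' by omega)
        omega
    have hSm : pvS ft m = s' + (m - b') * len' := hSlin m hbm (by omega)
    have hSm1 : pvS ft (m + 1) = s' + (m + 1 - b') * len' := by
      apply hSlin (m + 1) ?_ (by omega)
      intro t ht
      exact le_trans (hbm t ht) (by omega)
    -- the remainder
    have hdiff : pvS ft (m + 1) = pvS ft m + len' := by rw [hSm, hSm1]; ring
    have hrB0 : 0 ≤ k - pvS ft m := by omega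
    have hrBlt : k - pvS ft m < len' := by omega
    have hq : k - s' - (m - b') * len' = k - pvS ft m := by rw [hSm]; ring
    have hmodeq : PySem.Int.mod (k - s') len' = k - pvS ft m := by
      rw [pvmod_eq (k - s') len' (m - b') hlenpos (by rw [hq]; omega) (by rw [hq]; omega), hq]
    -- the two survivor predicates agree on ft's elements
    have hpredeq : ∀ x ∈ PySem.List.enumerate ft 0,
        (decide (p = 0 ∨ b' < x.2)) = (decide (m < x.2)) := by
      intro x hx
      have hx2 : x.2 ∈ ft := by
        rcases (PySem.List.mem_enumerate_iff ft 0 x).mp hx with ⟨j, hj, rfl⟩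
        exact List.getElem_mem hj
      have hxts : x.2 ∈ ts := htsperm.mem_iff.mpr hx2
      rw [← List.take_append_drop p ts] at hxts
      rcases List.mem_append.mp hxts with htk | hdr
      · have h1 : x.2 ≤ b' := hTake _ htk
        have h2 : x.2 ≤ m := hbm _ htk
        have hpos : 0 < p := by
          rcases Nat.eq_zero_or_pos p with h0 | hpos
          · rw [h0] at htk; simp at htk
          · exact hpos
        simp only [decide_eq_decide]
        constructor
        · rintro (h | h) <;> omega
        · intro h; omega
      · have h1 : y₀ ≤ x.2 := hDropy₀ _ hdr
        simp only [decide_eq_decide]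
        constructor
        · intro _; omega
        · intro _
          rcases Nat.eq_zero_or_pos p with h0 | hpos
          · exact Or.inl h0
          · exact Or.inr (hDropb hpos _ hdr)
    -- survivors, sorted by index, as a filter of the pushed pairs
    have hQlen : Q.length = ft.length := by
      have := hQperm.length_eq
      simp only [pvPairs, List.length_map, PySem.List.length_enumerate] at this
      omega
    have hdropfilter : Q.drop p = Q.filter (fun x => decide (p = 0 ∨ b' < x.1)) := by
      by_cases hp0 : p = 0
      · rw [hp0, List.drop_zero]
        symm
        apply List.filter_eq_self.mpr
        intro a _
        simp
      · conv_rhs => rw [← List.take_append_drop p Q]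
        rw [List.filter_append]
        have h1 : (Q.take p).filter (fun x => decide (p = 0 ∨ b' < x.1)) = [] := by
          apply List.filter_eq_nil_iff.mpr
          intro a ha
          have : a.1 ∈ ts.take p := by
            rw [htsdef, ← List.map_take]
            exact List.mem_map_of_mem ha
          have := hTake a.1 this
          simp only [decide_eq_true_eq]
          rintro (h | h)
          · exact hp0 h
          · omega
        have h2 : (Q.drop p).filter (fun x => decide (p = 0 ∨ b' < x.1)) = Q.drop p := by
          apply List.filter_eq_self.mpr
          intro a ha
          have : a.1 ∈ ts.drop p := by
            rw [htsdef, ← List.map_drop]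
            exact List.mem_map_of_mem ha
          have := hDropb (by omega) a.1 this
          simp only [decide_eq_true_eq]
          exact Or.inr this
        rw [h1, h2, List.nil_append]
    have hFperm : ((pvPairs ft).filter (fun x => decide (p = 0 ∨ b' < x.1))).Perm (Q.drop p) := by
      rw [hdropfilter]
      exact (hQperm.filter _).symm
    have hFpw : ((pvPairs ft).filter (fun x => decide (p = 0 ∨ b' < x.1))).Pairwise
        (fun a b => a.2 < b.2) :=
      (pairs_pw_snd ft).sublist List.filter_sublist
    have hsorted : PySem.List.sorted (Q.drop p) (fun x => x.2)
        = (pvPairs ft).filter (fun x => decide (p = 0 ∨ b' < x.1)) :=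
      PySem.List.sorted_eq_of_perm_of_pairwise_lt _ _ _ hFperm hFpw
    rw [hsorted]
    have hFlen : ((pvPairs ft).filter (fun x => decide (p = 0 ∨ b' < x.1))).length
        = ft.length - p := by
      rw [hFperm.length_eq, List.length_drop, hQlen]
    have hFmap : (pvPairs ft).filter (fun x => decide (p = 0 ∨ b' < x.1))
        = ((PySem.List.enumerate ft 0).filter (fun x => decide (p = 0 ∨ b' < x.2))).map
            (fun x => (x.2, x.1 + 1)) := by
      unfold pvPairs
      rw [List.filter_map]
      congr 1
    have hEFlen : ((PySem.List.enumerate ft 0).filter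
        (fun x => decide (p = 0 ∨ b' < x.2))).length = ft.length - p := by
      have := hFlen
      rw [hFmap, List.length_map] at this
      exact this
    have hfiltereq : (PySem.List.enumerate ft 0).filter (fun x => decide (p = 0 ∨ b' < x.2))
        = (PySem.List.enumerate ft 0).filter (fun x => decide (m < x.2)) :=
      List.filter_congr hpredeq
    -- B's side via the scan lemma
    have hrEFB : (k - pvS ft m).toNat < ((PySem.List.enumerate ft 0).filter
        (fun x => decide (m < x.2))).length := by
      rw [← hfiltereq, hEFlen]
      omega
    rw [scanB_eq m (PySem.List.enumerate ft 0) (k - pvS ft m) hrB0 hrEFB]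
    -- A's side: pyGetD on the filtered pairs
    rw [hmodeq]
    have hm' : (k - pvS ft m).toNat < ((PySem.List.enumerate ft 0).filter
        (fun x => decide (p = 0 ∨ b' < x.2))).length := by
      rw [hEFlen]; omega
    have hgd2 : PySem.List.pyGetD ((pvPairs ft).filter (fun x => decide (p = 0 ∨ b' < x.1)))
        (k - pvS ft m) ((0 : Int), (0 : Int))
        = ((pvPairs ft).filter (fun x => decide (p = 0 ∨ b' < x.1))).getD (k - pvS ft m).toNat
            ((0 : Int), (0 : Int)) := by
      rw [PySem.List.pyGetD_eq_getElem _ _ hrB0 (by rw [hFlen]; omega),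
          List.getD_eq_getElem _ _ (by rw [hFlen]; omega)]
    rw [hgd2, hFmap, hfiltereq]
    rw [List.getD_eq_getElem _ _ (by rw [List.length_map, ← hfiltereq]; exact hm'),
        List.getD_eq_getElem _ _ (by rw [← hfiltereq]; exact hm'), List.getElem_map]
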